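-- pv_equiv track=rewrite | github.com/AVXix/classical_confusion | scripts/midi_features.py | _triad_chord_id
-- ===== SOURCE A (Python) =====
-- def _triad_chord_id(pc_set: set[int]) -> int:
--     """Map a pitch-class set to a chord id (24 triads + other).
--
--     Output ids: 0..23 correspond to [Cmaj..Bmaj, Cmin..Bmin] interleaved by mode.
--     24 is "other".
--     """
--     if not pc_set:
--         return 24
--
--     pcs = set(int(p) % 12 for p in pc_set)
--
--     # major triad: root, root+4, root+7
--     for root in range(12):
--         if {root, (root + 4) % 12, (root + 7) % 12}.issubset(pcs):
--             return root  # 0..11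
--
--     # minor triad: root, root+3, root+7
--     for root in range(12):
--         if {root, (root + 3) % 12, (root + 7) % 12}.issubset(pcs):
--             return 12 + root  # 12..23
--
--     return 24
-- ===== SOURCE B (Python) =====
-- def _triad_chord_id(pc_set: set[int]) -> int:
--     """Map a pitch-class set to a chord id (24 triads + other).
--
--     Instead of scanning 12 candidate roots, compute all roots at once by set
--     algebra: r is a major root iff r, r+4 and r+7 (mod 12) are all present,
--     i.e. iff r lies in pcs & (pcs-4) & (pcs-7); the smallest such root wins.
--     """
--     pcs = {int(p) % 12 for p in pc_set}
--     if not pcs: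
--         return 24
--     s7 = {(q - 7) % 12 for q in pcs}
--     major_roots = pcs & {(q - 4) % 12 for q in pcs} & s7
--     if major_roots:
--         return min(major_roots)
--     minor_roots = pcs & {(q - 3) % 12 for q in pcs} & s7
--     if minor_roots:
--         return 12 + min(minor_roots)
--     return 24
-- ===== Notes on version B (the rewrite author's own statement) =====
-- stated objective: idiomatic
-- what changed: B replaces A's early-return scan over the 12 candidate roots (testing a 3-element subset per root) by set algebra over the pitch classes themselves: it intersects pcs with its shifts pcs-4/pcs-3 and pcs-7 (mod 12) to obtain all major/minor roots at once and returns the minimum, preserving major-before-minor and smallest-root order.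
import Mathlib
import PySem

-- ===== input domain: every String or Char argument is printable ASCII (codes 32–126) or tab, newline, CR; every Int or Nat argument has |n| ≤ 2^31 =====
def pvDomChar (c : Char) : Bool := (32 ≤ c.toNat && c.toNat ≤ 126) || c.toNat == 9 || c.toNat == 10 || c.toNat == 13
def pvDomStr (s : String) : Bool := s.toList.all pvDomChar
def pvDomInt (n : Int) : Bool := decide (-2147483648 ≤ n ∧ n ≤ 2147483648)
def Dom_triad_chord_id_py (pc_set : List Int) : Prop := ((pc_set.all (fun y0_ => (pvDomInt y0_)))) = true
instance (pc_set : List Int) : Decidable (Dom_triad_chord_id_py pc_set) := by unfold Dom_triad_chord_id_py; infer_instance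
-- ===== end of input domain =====

-- B replaces A's early-return scan over the 12 candidate roots by set algebra on the pitch
-- classes: it intersects pcs with its shifts (pcs-4 / pcs-3 and pcs-7 mod 12) to obtain all
-- major/minor roots at once and returns the minimum (objective: idiomatic, same cost).

-- ===== PORT A =====
def triad_chord_id_py (pc_set : List Int) : Int :=
  if pc_set = [] then 24
  else
    let pcs : PySem.Set Int := PySem.Set.ofList (pc_set.map (fun p => PySem.Int.mod p 12))
    match (PySem.List.pyRange 0 12 1).find? (fun root =>
        PySem.Set.issubset
          (PySem.Set.ofList [root, PySem.Int.mod (root + 4) 12, PySem.Int.mod (root + 7) 12]) pcs) with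
    | some root => root
    | none =>
      match (PySem.List.pyRange 0 12 1).find? (fun root =>
          PySem.Set.issubset
            (PySem.Set.ofList [root, PySem.Int.mod (root + 3) 12, PySem.Int.mod (root + 7) 12]) pcs) with
      | some root => 12 + root
      | none => 24

-- ===== PORT B =====
def triad_chord_id_py_alt (pc_set : List Int) : Int :=
  let pcs : PySem.Set Int := PySem.Set.ofList (pc_set.map (fun p => PySem.Int.mod p 12))
  if pcs = [] then 24
  else
    let s7 : PySem.Set Int := PySem.Set.ofList (pcs.map (fun q => PySem.Int.mod (q - 7) 12))
    let major_roots : PySem.Set Int :=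
      PySem.Set.inter (PySem.Set.inter pcs
        (PySem.Set.ofList (pcs.map (fun q => PySem.Int.mod (q - 4) 12)))) s7
    match PySem.List.min? major_roots (fun x => x) with
    | some m => m
    | none =>
      let minor_roots : PySem.Set Int :=
        PySem.Set.inter (PySem.Set.inter pcs
          (PySem.Set.ofList (pcs.map (fun q => PySem.Int.mod (q - 3) 12)))) s7
      match PySem.List.min? minor_roots (fun x => x) with
      | some m => 12 + m
      | none => 24

-- ===== PRECONDITION & SPEC =====
def Spec_triad_chord_id_py (pc_set : List Int) (out : Int) : Prop := out = triad_chord_id_py_alt pc_set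
instance (pc_set : List Int) (out : Int) : Decidable (Spec_triad_chord_id_py pc_set out) := by unfold Spec_triad_chord_id_py; infer_instance

-- ===== CLAIM (what is proved, stated in full; the proofs are below) =====
def Claim_equal_triad_chord_id_py : Prop := ∀ (pc_set : List Int), Dom_triad_chord_id_py pc_set → Spec_triad_chord_id_py pc_set (triad_chord_id_py pc_set)

-- ===== LEMMAS AND PROOFS =====

-- PySem.Int.mod with positive divisor 12 is Int.emod
lemma pv_mod12 (x : Int) : PySem.Int.mod x 12 = x % 12 :=
  PySem.Int.mod_eq_emod_of_pos (by norm_num)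

-- min? with identity key returns any least element
lemma pv_min?_eq_of_least (l : List Int) (m : Int) (hm : m ∈ l) (hle : ∀ y ∈ l, m ≤ y) :
    PySem.List.min? l (fun x => x) = some m := by
  cases h : PySem.List.min? l (fun x => x) with
  | none =>
    rw [PySem.List.min?_eq_none_iff] at h
    subst h; simp at hm
  | some m' =>
    have h1 : m' ∈ l := PySem.List.min?_mem h
    have h2 : m' ≤ m := PySem.List.min?_isMin h m hm
    have h3 : m ≤ m' := hle m' h1
    exact congrArg some (le_antisymm h2 h3)

-- A's subset test over a 3-element literal set is the conjunction of memberships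
lemma pv_issubset3 (pcs : PySem.Set Int) (a b c : Int) :
    (PySem.Set.issubset (PySem.Set.ofList [a, b, c]) pcs = true) ↔
      (a ∈ pcs ∧ b ∈ pcs ∧ c ∈ pcs) := by
  rw [PySem.Set.issubset_iff]
  constructor
  · intro h
    refine ⟨?_, ?_, ?_⟩ <;> exact h _ (by rw [PySem.Set.mem_ofList]; simp)
  · rintro ⟨h1, h2, h3⟩ x hx
    rw [PySem.Set.mem_ofList] at hx
    simp only [List.mem_cons, List.not_mem_nil, or_false] at hx
    rcases hx with rfl | rfl | rfl <;> assumption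

-- membership in a shifted copy of pcs, for m itself a pitch class
lemma pv_mem_shift (pcs : PySem.Set Int) (hb : ∀ x ∈ pcs, 0 ≤ x ∧ x < 12)
    (d m : Int) (hm : m ∈ pcs) :
    (m ∈ PySem.Set.ofList (pcs.map (fun q => PySem.Int.mod (q - d) 12))) ↔
      ((m + d) % 12 ∈ pcs) := by
  rw [PySem.Set.mem_ofList]
  simp only [List.mem_map, pv_mod12]
  have hmb := hb m hm
  constructor
  · rintro ⟨q, hq, hqm⟩
    have hqb := hb q hq
    have : (m + d) % 12 = q := by omega
    rwa [this]
  · intro h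
    refine ⟨(m + d) % 12, h, ?_⟩
    have hb' := hb _ h
    omega

-- one branch (offset d = 4 for major, 3 for minor): A's first-hit scan over the 12 roots
-- equals the minimum of B's intersection of shifted sets
lemma pv_branch_eq (pcs : PySem.Set Int) (hb : ∀ x ∈ pcs, 0 ≤ x ∧ x < 12) (d : Int) :
    ((PySem.List.pyRange 0 12 1).filter (fun root =>
        PySem.Set.issubset
          (PySem.Set.ofList [root, PySem.Int.mod (root + d) 12, PySem.Int.mod (root + 7) 12])
          pcs)).head? =
      PySem.List.min?
        (PySem.Set.inter (PySem.Set.inter pcs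
          (PySem.Set.ofList (pcs.map (fun q => PySem.Int.mod (q - d) 12))))
          (PySem.Set.ofList (pcs.map (fun q => PySem.Int.mod (q - 7) 12)))) (fun x => x) := by
  have hFmem : ∀ m : Int,
      m ∈ (PySem.List.pyRange 0 12 1).filter (fun root =>
        PySem.Set.issubset
          (PySem.Set.ofList [root, PySem.Int.mod (root + d) 12, PySem.Int.mod (root + 7) 12])
          pcs) ↔
      (0 ≤ m ∧ m < 12 ∧ m ∈ pcs ∧ (m + d) % 12 ∈ pcs ∧ (m + 7) % 12 ∈ pcs) := by
    intro m
    rw [List.mem_filter, PySem.List.mem_pyRange_one, pv_issubset3]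
    simp only [pv_mod12]
    tauto
  have hMmem : ∀ m : Int,
      m ∈ PySem.Set.inter (PySem.Set.inter pcs
          (PySem.Set.ofList (pcs.map (fun q => PySem.Int.mod (q - d) 12))))
          (PySem.Set.ofList (pcs.map (fun q => PySem.Int.mod (q - 7) 12))) ↔
      (m ∈ pcs ∧ (m + d) % 12 ∈ pcs ∧ (m + 7) % 12 ∈ pcs) := by
    intro m
    rw [PySem.Set.mem_inter, PySem.Set.mem_inter]
    constructor
    · rintro ⟨⟨h1, h2⟩, h3⟩
      exact ⟨h1, (pv_mem_shift pcs hb d m h1).mp h2, (pv_mem_shift pcs hb 7 m h1).mp h3⟩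
    · rintro ⟨h1, h2, h3⟩
      exact ⟨⟨h1, (pv_mem_shift pcs hb d m h1).mpr h2⟩, (pv_mem_shift pcs hb 7 m h1).mpr h3⟩
  cases hF : (PySem.List.pyRange 0 12 1).filter (fun root =>
      PySem.Set.issubset
        (PySem.Set.ofList [root, PySem.Int.mod (root + d) 12, PySem.Int.mod (root + 7) 12])
        pcs) with
  | nil =>
    have hM : PySem.Set.inter (PySem.Set.inter pcs
        (PySem.Set.ofList (pcs.map (fun q => PySem.Int.mod (q - d) 12))))
        (PySem.Set.ofList (pcs.map (fun q => PySem.Int.mod (q - 7) 12))) = [] := by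
      rw [List.eq_nil_iff_forall_not_mem]
      intro m hm
      have h := (hMmem m).mp hm
      have hbm := hb m h.1
      have : m ∈ ([] : List Int) := by
        rw [← hF, hFmem]
        exact ⟨hbm.1, hbm.2, h⟩
      simp at this
    rw [hM]
    rfl
  | cons a t =>
    have haF : a ∈ (PySem.List.pyRange 0 12 1).filter (fun root =>
        PySem.Set.issubset
          (PySem.Set.ofList [root, PySem.Int.mod (root + d) 12, PySem.Int.mod (root + 7) 12])
          pcs) := by rw [hF]; simp
    have hsorted : ((PySem.List.pyRange 0 12 1).filter (fun root =>
        PySem.Set.issubset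
          (PySem.Set.ofList [root, PySem.Int.mod (root + d) 12, PySem.Int.mod (root + 7) 12])
          pcs)).Pairwise (· < ·) := by
      apply List.Pairwise.filter
      decide
    rw [hF] at hsorted
    have hleast : ∀ y ∈ t, a < y := (List.pairwise_cons.mp hsorted).1
    have ha := (hFmem a).mp haF
    symm
    apply pv_min?_eq_of_least
    · rw [hMmem]
      exact ⟨ha.2.2.1, ha.2.2.2⟩
    · intro y hy
      have h := (hMmem y).mp hy
      have hby := hb y h.1
      have : y ∈ a :: t := by
        rw [← hF, hFmem]
        exact ⟨hby.1, hby.2, h⟩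
      rcases List.mem_cons.mp this with rfl | hyt
      · exact le_refl _
      · exact le_of_lt (hleast y hyt)

-- ===== VERDICT (by name: the statement is the Claim_ definition above) =====
theorem triad_chord_id_py_spec : Claim_equal_triad_chord_id_py := by
  intro pc_set _
  unfold Spec_triad_chord_id_py triad_chord_id_py triad_chord_id_py_alt
  by_cases hemp : pc_set = []
  · subst hemp; rfl
  · have hpcs_ne : PySem.Set.ofList (pc_set.map (fun p => PySem.Int.mod p 12)) ≠ [] := by
      cases pc_set with
      | nil => exact absurd rfl hemp
      | cons p t =>
        intro h
        have : PySem.Int.mod p 12 ∈ PySem.Set.ofList ((p :: t).map (fun p => PySem.Int.mod p 12)) := by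
          rw [PySem.Set.mem_ofList]; simp
        rw [h] at this
        simp at this
    have hb : ∀ x ∈ PySem.Set.ofList (pc_set.map (fun p => PySem.Int.mod p 12)),
        0 ≤ x ∧ x < 12 := by
      intro x hx
      rw [PySem.Set.mem_ofList] at hx
      rcases List.mem_map.mp hx with ⟨p, _, rfl⟩
      exact ⟨PySem.Int.mod_nonneg p (by norm_num), PySem.Int.mod_lt p (by norm_num)⟩
    simp only [if_neg hemp, if_neg hpcs_ne]
    rw [← List.head?_filter, ← List.head?_filter,
      pv_branch_eq _ hb 4, pv_branch_eq _ hb 3]
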